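-- pv_equiv track=rewrite | github.com/jmaldon1/Crypto_wallet | software/Python/bip39_table_gen.py | hexStringChecksum
-- ===== SOURCE A (Python) =====
-- def hexStringChecksum(hexString):
--     checksum = 0
--     previous = ""
--
--     for idx, current in enumerate(hexString):
--         if (idx % 2) == 0:
--             previous = current
--         else:
--             checksum += int(previous + current, 16)
--     return ((~checksum + 1) & 0xFF)
-- ===== SOURCE B (Python) =====
-- def hexStringChecksum(hexString):
--     n = len(hexString)
--     checksum = sum(int(hexString[i:i + 2], 16) for i in range(0, n - n % 2, 2))
--     return (-checksum) & 0xFF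
-- ===== Notes on version B (the rewrite author's own statement) =====
-- stated objective: simpler
-- what changed: B replaces A's character-by-character loop with an idx%2 parity toggle and a one-character look-behind register by a single sum over two-character slices at even offsets, returning (-checksum) & 0xFF.
import Mathlib
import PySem

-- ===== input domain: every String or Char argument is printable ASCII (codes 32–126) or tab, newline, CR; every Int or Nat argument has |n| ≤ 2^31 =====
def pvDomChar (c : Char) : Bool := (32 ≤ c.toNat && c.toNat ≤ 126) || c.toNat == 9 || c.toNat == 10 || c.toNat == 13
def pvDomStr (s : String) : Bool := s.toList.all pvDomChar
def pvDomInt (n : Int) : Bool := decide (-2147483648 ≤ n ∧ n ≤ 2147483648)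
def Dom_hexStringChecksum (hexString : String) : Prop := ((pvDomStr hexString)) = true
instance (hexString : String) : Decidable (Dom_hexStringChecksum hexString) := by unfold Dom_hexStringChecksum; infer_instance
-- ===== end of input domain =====

-- B replaces A's character-by-character parity state machine by one sum over two-character
-- chunks and returns (-checksum) & 0xFF; objective: simpler (same cost, same values).

-- ===== PORT A =====
def hexStringChecksum (hexString : String) : Int :=
  -- 'previous' is kept as a list of characters; int(previous + current, 16) is
  -- PySem.Int.ofCharsBase? … 16 (exact, including whitespace/sign forms and ValueError = none)
  let r := (PySem.List.enumerate hexString.toList).foldl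
    (fun (st : Option Int × List Char) (p : Int × Char) =>
      if PySem.Int.mod p.1 2 == 0 then
        (st.1, [p.2])
      else
        (st.1.bind (fun c => (PySem.Int.ofCharsBase? (st.2 ++ [p.2]) 16).map (fun v => c + v)),
         st.2))
    (some 0, [])
  match r.1 with
  | some c => PySem.Int.band (Int.not c + 1) 255
  | none => 0   -- unreachable under Pre_ (Python raises ValueError there)

-- ===== PORT B =====
def hexStringChecksum_alt (hexString : String) : Int :=
  let cs := hexString.toList
  let n : Int := cs.length
  let r := (PySem.List.pyRange 0 (n - PySem.Int.mod n 2) 2).foldl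
    (fun (acc : Option Int) i =>
      acc.bind (fun x =>
        (PySem.Int.ofCharsBase? (PySem.List.slice cs (some i) (some (i + 2))) 16).map
          (fun v => x + v)))
    (some 0)
  match r with
  | some c => PySem.Int.band (-c) 255
  | none => 0   -- unreachable under Pre_ (Python raises ValueError there)

-- ===== PRECONDITION & SPEC =====
-- the complete 2-character chunks of a character list (a dangling last character is dropped)
def pvPairs : List Char → List (Char × Char)
  | [] => []
  | [_] => []
  | a :: b :: rest => (a, b) :: pvPairs rest

-- Pre_ excludes exactly the inputs on which Python A raises ValueError:
-- some complete 2-character chunk is not accepted by int(·, 16).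
def Pre_hexStringChecksum (hexString : String) : Prop :=
  (pvPairs hexString.toList).all
    (fun p => (PySem.Int.ofCharsBase? [p.1, p.2] 16).isSome) = true

instance (hexString : String) : Decidable (Pre_hexStringChecksum hexString) := by
  unfold Pre_hexStringChecksum; infer_instance

def pvWitness_hexStringChecksum : String := "deadbeef"

def Spec_hexStringChecksum (hexString : String) (out : Int) : Prop :=
  out = hexStringChecksum_alt hexString
instance (hexString : String) (out : Int) : Decidable (Spec_hexStringChecksum hexString out) := by
  unfold Spec_hexStringChecksum; infer_instance

-- ===== CLAIM (what is proved, stated in full; the proofs are below) =====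
def Claim_equal_hexStringChecksum : Prop :=
  ∀ (hexString : String), Dom_hexStringChecksum hexString →
    Pre_hexStringChecksum hexString →
    Spec_hexStringChecksum hexString (hexStringChecksum hexString)

-- ===== LEMMAS AND PROOFS =====

-- common reference computation: Option-threaded sum of the chunk values
def pvSumPairs (acc : Option Int) (ps : List (Char × Char)) : Option Int :=
  ps.foldl
    (fun a p => a.bind (fun x => (PySem.Int.ofCharsBase? [p.1, p.2] 16).map (fun v => x + v)))
    acc

theorem pvNot_add_one (t : Int) : Int.not t + 1 = -t := by
  cases t with
  | ofNat n => simp [Int.not, Int.negSucc_eq]; try ring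
  | negSucc n => simp [Int.not, Int.negSucc_eq]; try ring

-- A's fold over enumerate, started at any even index, computes pvSumPairs
theorem pvFoldA_eq (cs : List Char) : ∀ (k : Nat) (acc : Option Int) (prev : List Char),
    ((PySem.List.enumerate cs (2 * (k : Int))).foldl
      (fun (st : Option Int × List Char) (p : Int × Char) =>
        if PySem.Int.mod p.1 2 == 0 then
          (st.1, [p.2])
        else
          (st.1.bind (fun c => (PySem.Int.ofCharsBase? (st.2 ++ [p.2]) 16).map (fun v => c + v)),
           st.2))
      (acc, prev)).1 = pvSumPairs acc (pvPairs cs) := by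
  induction cs using pvPairs.induct with
  | case1 => intro k acc prev; simp [PySem.List.enumerate_nil, pvPairs, pvSumPairs]
  | case2 a =>
      intro k acc prev
      have hmod : (PySem.Int.mod (2 * (k : Int)) 2 == 0) = true := by
        simp only [beq_iff_eq]
        exact (PySem.Int.mod_eq_zero_iff_dvd (2 * (k : Int)) 2).mpr ⟨k, by ring⟩
      rw [PySem.List.enumerate_cons, PySem.List.enumerate_nil, List.foldl_cons]
      simp only [hmod, if_true, List.foldl_nil]
      simp [pvPairs, pvSumPairs]
  | case3 a b rest ih =>
      intro k acc prev
      have hmod : (PySem.Int.mod (2 * (k : Int)) 2 == 0) = true := by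
        simp only [beq_iff_eq]
        exact (PySem.Int.mod_eq_zero_iff_dvd (2 * (k : Int)) 2).mpr ⟨k, by ring⟩
      have hmod1 : (PySem.Int.mod (2 * (k : Int) + 1) 2 == 0) = false := by
        simp only [beq_eq_false_iff_ne, ne_eq]
        intro h
        rcases (PySem.Int.mod_eq_zero_iff_dvd _ _).mp h with ⟨m, hm⟩
        omega
      have hshift : 2 * (k : Int) + 1 + 1 = 2 * ((k + 1 : Nat) : Int) := by push_cast; ring
      rw [PySem.List.enumerate_cons, PySem.List.enumerate_cons, List.foldl_cons, List.foldl_cons]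
      simp only [hmod, hmod1, if_true, if_false, Bool.false_eq_true]
      rw [hshift, ih (k + 1)]
      simp [pvPairs, pvSumPairs]

-- chunk fold over the pair indices computes pvSumPairs
theorem pvFoldB_eq (cs : List Char) : ∀ (acc : Option Int),
    (List.range (cs.length / 2)).foldl
      (fun (acc : Option Int) k =>
        acc.bind (fun x =>
          (PySem.Int.ofCharsBase? ((cs.drop (2 * k)).take 2) 16).map (fun v => x + v)))
      acc = pvSumPairs acc (pvPairs cs) := by
  induction cs using pvPairs.induct with
  | case1 => intro acc; simp [pvPairs, pvSumPairs]
  | case2 a => intro acc; simp [pvPairs, pvSumPairs]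
  | case3 a b rest ih =>
      intro acc
      have hlen : (a :: b :: rest).length / 2 = rest.length / 2 + 1 := by
        simp only [List.length_cons]; omega
      rw [hlen, List.range_succ_eq_map, List.foldl_cons, List.foldl_map]
      have hfun :
          (fun (acc : Option Int) k =>
            acc.bind (fun x =>
              (PySem.Int.ofCharsBase?
                (((a :: b :: rest).drop (2 * (Nat.succ k))).take 2) 16).map (fun v => x + v)))
          = (fun (acc : Option Int) k =>
            acc.bind (fun x =>
              (PySem.Int.ofCharsBase? ((rest.drop (2 * k)).take 2) 16).map (fun v => x + v))) := by
        funext acc k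
        have h2 : 2 * (Nat.succ k) = (2 * k) + 1 + 1 := by omega
        rw [h2, List.drop_succ_cons, List.drop_succ_cons]
      rw [hfun, ih]
      simp [pvPairs, pvSumPairs]

-- B's pyRange of even offsets is the list of chunk start positions
theorem pvRange_even (n : Nat) :
    PySem.List.pyRange 0 ((n : Int) - PySem.Int.mod (n : Int) 2) 2 =
      (List.range (n / 2)).map (fun k => ((2 * k : Nat) : Int)) := by
  have hmod : PySem.Int.mod (n : Int) 2 = (n : Int) % 2 :=
    PySem.Int.mod_eq_emod_of_pos (by norm_num)
  have hb : (n : Int) - (n : Int) % 2 = ((2 * (n / 2) : Nat) : Int) := by push_cast; omega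
  rw [hmod, hb, PySem.List.pyRange_of_pos _ _ (by norm_num : (0 : Int) < 2)]
  have hcount :
      (if (0 : Int) < ((2 * (n / 2) : Nat) : Int)
        then ((((2 * (n / 2) : Nat) : Int) - 0 + 2 - 1) / 2).toNat else 0) = n / 2 := by
    rcases Nat.eq_zero_or_pos (n / 2) with h | h
    · simp [h]
    · rw [if_pos (by exact_mod_cast (show (0:Nat) < 2 * (n / 2) by omega) : (0 : Int) < ((2 * (n / 2) : Nat) : Int))]
      omega
  rw [hcount]
  apply List.map_congr_left
  intro k _
  push_cast
  ring

-- under Pre_, the chunk sum is defined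
theorem pvSumPairs_isSome (ps : List (Char × Char))
    (h : ps.all (fun p => (PySem.Int.ofCharsBase? [p.1, p.2] 16).isSome) = true) :
    ∀ (x : Int), ∃ t, pvSumPairs (some x) ps = some t := by
  induction ps with
  | nil => intro x; exact ⟨x, rfl⟩
  | cons p ps ih =>
      intro x
      simp only [List.all_cons, Bool.and_eq_true] at h
      rcases Option.isSome_iff_exists.mp h.1 with ⟨v, hv⟩
      rcases ih h.2 (x + v) with ⟨t, ht⟩
      exact ⟨t, by simpa [pvSumPairs, hv] using ht⟩

-- ===== VERDICT (by name: the statement is the Claim_ definition above) =====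
theorem hexStringChecksum_spec : Claim_equal_hexStringChecksum := by
  intro s _hdom hpre
  unfold Pre_hexStringChecksum at hpre
  unfold Spec_hexStringChecksum hexStringChecksum hexStringChecksum_alt
  have hA := pvFoldA_eq s.toList 0 (some 0) []
  simp only [Nat.cast_zero, mul_zero] at hA
  have hB :
      (PySem.List.pyRange 0 ((s.toList.length : Int) - PySem.Int.mod (s.toList.length : Int) 2) 2).foldl
        (fun (acc : Option Int) i =>
          acc.bind (fun x =>
            (PySem.Int.ofCharsBase? (PySem.List.slice s.toList (some i) (some (i + 2))) 16).map
              (fun v => x + v)))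
        (some 0) = pvSumPairs (some 0) (pvPairs s.toList) := by
    rw [pvRange_even, List.foldl_map]
    have hfun :
        (fun (acc : Option Int) (k : Nat) =>
          acc.bind (fun x =>
            (PySem.Int.ofCharsBase?
              (PySem.List.slice s.toList (some ((2 * k : Nat) : Int))
                (some (((2 * k : Nat) : Int) + 2))) 16).map (fun v => x + v)))
        = (fun (acc : Option Int) (k : Nat) =>
          acc.bind (fun x =>
            (PySem.Int.ofCharsBase? ((s.toList.drop (2 * k)).take 2) 16).map (fun v => x + v))) := by
      funext acc k
      have hc : (((2 * k : Nat) : Int) + 2) = (((2 * k : Nat) : Int) + ((2 : Nat) : Int)) := by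
        norm_num
      rw [hc, PySem.List.slice_natCast_add]
    rw [hfun, pvFoldB_eq]
  rcases pvSumPairs_isSome (pvPairs s.toList) hpre 0 with ⟨t, ht⟩
  simp only [hA, hB, ht, pvNot_add_one]
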